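-- pv_equiv track=rewrite | github.com/kckevinchen/RTS-SQL | src/extraction_utils.py | get_index_for_prefix
-- ===== SOURCE A (Python) =====
-- def get_index_for_prefix(tokens, prefix):
--   s = ""
--   selected_idx = None
--   for idx, t in enumerate(tokens):
--     s += t
--     if(prefix in s):
--       selected_idx = idx + 1
--       break
--   return selected_idx
-- ===== SOURCE B (Python) =====
-- def get_index_for_prefix(tokens, prefix):
--   # Join once, locate the first occurrence of prefix in the full string,
--   # then scan cumulative token lengths for the first one covering the match end.
--   joined = "".join(tokens)
--   pos = joined.find(prefix)
--   if pos == -1: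
--     return None
--   end = pos + len(prefix)
--   cum = 0
--   for idx, t in enumerate(tokens):
--     cum += len(t)
--     if cum >= end:
--       return idx + 1
--   return None
-- ===== Notes on version B (the rewrite author's own statement) =====
-- stated objective: faster
-- what changed: Instead of rebuilding a growing cumulative string and running a substring search on it for every token (quadratic), B joins the tokens once, does a single find of the prefix, and scans cumulative token lengths for the first index covering the match end.
import Mathlib
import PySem

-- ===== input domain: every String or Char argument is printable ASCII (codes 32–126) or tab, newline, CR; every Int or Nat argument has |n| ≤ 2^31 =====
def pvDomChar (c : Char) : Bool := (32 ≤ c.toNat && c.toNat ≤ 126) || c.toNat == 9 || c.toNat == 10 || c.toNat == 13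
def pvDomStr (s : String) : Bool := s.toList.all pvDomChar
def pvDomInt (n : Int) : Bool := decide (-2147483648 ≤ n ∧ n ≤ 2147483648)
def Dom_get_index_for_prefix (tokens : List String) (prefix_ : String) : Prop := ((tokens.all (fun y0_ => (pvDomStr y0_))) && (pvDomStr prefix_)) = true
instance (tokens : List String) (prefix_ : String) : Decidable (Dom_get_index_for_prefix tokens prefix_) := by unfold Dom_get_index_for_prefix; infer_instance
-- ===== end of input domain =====

-- B joins the tokens once, finds the prefix once, and locates the covering token by a
-- cumulative-length scan, replacing A's substring search over every growing cumulative string.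

-- ===== PORT A =====
-- A's loop: s accumulates the concatenation, idx counts tokens; 'break' = return some
def pvLoopA : List String → List Char → List Char → Int → Option Int
  | [], _, _, _ => none
  | t :: rest, p, s, idx =>
    let s' := s ++ t.toList
    if PySem.Chars.isIn p s' then some (idx + 1) else pvLoopA rest p s' (idx + 1)

def get_index_for_prefix (tokens : List String) (prefix_ : String) : Option Int :=
  pvLoopA tokens prefix_.toList [] 0

-- ===== PORT B =====
-- B's loop: first idx + 1 whose cumulative token length reaches the match end
def pvLoopB : List String → Int → Int → Int → Option Int
  | [], _, _, _ => none
  | t :: rest, endPos, cum, idx =>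
    let cum' := cum + (t.toList.length : Int)
    if endPos ≤ cum' then some (idx + 1) else pvLoopB rest endPos cum' (idx + 1)

def get_index_for_prefix_alt (tokens : List String) (prefix_ : String) : Option Int :=
  let joined := PySem.Chars.join [] (tokens.map String.toList)
  let pos := PySem.Chars.find joined prefix_.toList
  if pos = -1 then none
  else pvLoopB tokens (pos + (prefix_.toList.length : Int)) 0 0

-- ===== PRECONDITION & SPEC =====
def Spec_get_index_for_prefix (tokens : List String) (prefix_ : String) (out : Option Int) : Prop := out = get_index_for_prefix_alt tokens prefix_
instance (tokens : List String) (prefix_ : String) (out : Option Int) : Decidable (Spec_get_index_for_prefix tokens prefix_ out) := by unfold Spec_get_index_for_prefix; infer_instance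

-- ===== CLAIM (what is proved, stated in full; the proofs are below) =====
def Claim_equal_get_index_for_prefix : Prop := ∀ (tokens : List String) (prefix_ : String), Dom_get_index_for_prefix tokens prefix_ → Spec_get_index_for_prefix tokens prefix_ (get_index_for_prefix tokens prefix_)

-- ===== LEMMAS AND PROOFS =====

-- "".join is flatten
theorem pv_join_nil_flatten (ps : List (List Char)) : PySem.Chars.join [] ps = ps.flatten := by
  induction ps with
  | nil => rfl
  | cons a l ih =>
    cases l with
    | nil => simp [PySem.Chars.join, List.intercalate]
    | cons b m => simp_all [PySem.Chars.join, List.intercalate, List.intersperse]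

-- p occurs within the first m characters of T iff it occurs in T with its first occurrence ending by m
theorem pv_infix_take_iff (p T : List Char) (m : Nat) :
    p <:+: T.take m ↔ (p <:+: T ∧ (PySem.Chars.find T p).toNat + p.length ≤ m) := by
  rcases eq_or_ne p [] with rfl | hp
  · simp [PySem.Chars.find_nil]
  constructor
  · intro h
    have h1 : PySem.Chars.isIn p (T.take m) = true := (PySem.Chars.isIn_iff_infix p _).2 h
    obtain ⟨j, hj⟩ := (PySem.Chars.exists_prefix_drop_iff_isIn p (T.take m)).2 h1
    rw [List.drop_take] at hj
    have hj2 := (List.prefix_take_iff).1 hj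
    have hT : p <:+: T := hj2.1.isInfix.trans (List.drop_suffix j T).isInfix
    have hf : 0 ≤ PySem.Chars.find T p := (PySem.Chars.find_nonneg_iff T p).2 hT
    obtain ⟨-, hmin⟩ := PySem.Chars.find_spec hf
    have hfj : (PySem.Chars.find T p).toNat ≤ j := by
      by_contra hc
      exact hmin j (by omega) hj2.1
    have hplen : 0 < p.length := List.length_pos_iff.2 hp
    have := hj2.2
    exact ⟨hT, by omega⟩
  · rintro ⟨hT, hle⟩
    have hf : 0 ≤ PySem.Chars.find T p := (PySem.Chars.find_nonneg_iff T p).2 hT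
    obtain ⟨hpre, -⟩ := PySem.Chars.find_spec hf
    have h2 : p <+: (T.take m).drop (PySem.Chars.find T p).toNat := by
      rw [List.drop_take]
      exact (List.prefix_take_iff).2 ⟨hpre, by omega⟩
    exact h2.isInfix.trans (List.drop_suffix _ (T.take m)).isInfix

-- the two loops agree, with T the fixed total concatenation
theorem pv_loops_eq (p : List Char) (ts : List String) (s : List Char) (idx : Int) :
    pvLoopA ts p s idx =
      (if p <:+: (s ++ (ts.map String.toList).flatten) then
        pvLoopB ts (PySem.Chars.find (s ++ (ts.map String.toList).flatten) p + (p.length : Int)) (s.length : Int) idx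
      else none) := by
  induction ts generalizing s idx with
  | nil =>
    simp [pvLoopA, pvLoopB]
  | cons t rest ih =>
    have hT : s ++ ((t :: rest).map String.toList).flatten
        = (s ++ t.toList) ++ (rest.map String.toList).flatten := by simp
    set T := s ++ ((t :: rest).map String.toList).flatten with hTdef
    have hpre : (s ++ t.toList) = T.take (s.length + t.toList.length) := by
      rw [hT, List.take_left']; simp
    by_cases hin : p <:+: T
    · have hf : 0 ≤ PySem.Chars.find T p := (PySem.Chars.find_nonneg_iff T p).2 hin
      rw [if_pos hin]
      show (if PySem.Chars.isIn p (s ++ t.toList) then some (idx+1)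
            else pvLoopA rest p (s ++ t.toList) (idx+1)) = _
      rw [show pvLoopB (t :: rest) (PySem.Chars.find T p + (p.length : Int)) (s.length : Int) idx
          = (if PySem.Chars.find T p + (p.length : Int) ≤ (s.length : Int) + (t.toList.length : Int)
             then some (idx+1)
             else pvLoopB rest (PySem.Chars.find T p + (p.length : Int)) ((s.length : Int) + (t.toList.length : Int)) (idx+1)) from rfl]
      have hiff : PySem.Chars.isIn p (s ++ t.toList) = true
          ↔ PySem.Chars.find T p + (p.length : Int) ≤ (s.length : Int) + (t.toList.length : Int) := by
        rw [PySem.Chars.isIn_iff_infix, hpre, pv_infix_take_iff]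
        constructor
        · rintro ⟨-, h2⟩; omega
        · intro h; exact ⟨hin, by omega⟩
      by_cases hc : PySem.Chars.isIn p (s ++ t.toList)
      · rw [if_pos hc, if_pos (hiff.1 hc)]
      · rw [if_neg hc, if_neg (fun h => hc (hiff.2 h))]
        rw [ih (s ++ t.toList) (idx + 1), ← hT, if_pos hin]
        norm_num [List.length_append]
    · rw [if_neg hin]
      show (if PySem.Chars.isIn p (s ++ t.toList) then some (idx+1)
            else pvLoopA rest p (s ++ t.toList) (idx+1)) = none
      have hnc : PySem.Chars.isIn p (s ++ t.toList) = false := by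
        rw [PySem.Chars.isIn_eq_false_iff]
        intro hp
        exact hin (hp.trans (by rw [hT]; exact (List.prefix_append _ _).isInfix))
      rw [hnc, if_neg (by simp)]
      rw [ih (s ++ t.toList) (idx + 1), ← hT, if_neg hin]

-- ===== VERDICT (by name: the statement is the Claim_ definition above) =====
theorem get_index_for_prefix_spec : Claim_equal_get_index_for_prefix := by
  intro tokens prefix_ _
  unfold Spec_get_index_for_prefix get_index_for_prefix get_index_for_prefix_alt
  rw [pv_join_nil_flatten, pv_loops_eq]
  simp only [List.nil_append, List.length_nil]
  by_cases h : prefix_.toList <:+: (tokens.map String.toList).flatten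
  · rw [if_pos h, if_neg (by rw [PySem.Chars.find_eq_neg_one_iff]; simpa using h)]
    norm_num
  · rw [if_neg h, if_pos (by rw [PySem.Chars.find_eq_neg_one_iff]; exact h)]
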